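-- pv_equiv track=rewrite | github.com/cguccione/Rutgers-REU-Cancer-Research | OldRutgers/hammingDistance_MATRIXout.py | compare_mutations
-- ===== SOURCE A (Python) =====
-- def compare_mutations(list1, list2):
--     temp1=list1.copy()
--     temp2=list2.copy()
--     '''
--     Finds diffrences in mutations
--     Input: Two sets of mutations
--     Outputs: A list of mutations appear in only one list and the length of that list
--     '''
--     count1= len(temp1)
--     #Loops through the first list
--     while count1 > 0:
--         count1=count1-1
--         count2= len(temp2)
--         #Loops through the second list
--         while count2 > 0:
--             count2= count2 -1
--             #Checks to see if any elements in the first list also appear in the second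
--             if temp1[count1] == temp2[count2]:
--                 #If a mutation appears in both lists it is removed from both lists
--                 bad=temp1[count1]
--                 temp1.remove(bad)
--                 temp2.remove(bad)
--                 break
--     #The remaning elements found in only one list are combined
--     final_list= temp1 + temp2
--     count=len(final_list)
--     return final_list, count
-- ===== SOURCE B (Python) =====
-- def compare_mutations(list1, list2):
--     '''
--     Finds diffrences in mutations
--     Input: Two sets of mutations
--     Outputs: A list of mutations appear in only one list and the length of that list
--     '''
--     counts1 = {}
--     for x in list1:
--         counts1[x] = counts1.get(x, 0) + 1
--     counts2 = {}
--     for x in list2: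
--         counts2[x] = counts2.get(x, 0) + 1
--     final_list = []
--     # drop the first min(count1[v], count2[v]) occurrences of each value v
--     # from each list; keep the rest, in order
--     for x in list1:
--         if counts2.get(x, 0) > 0:
--             counts2[x] -= 1
--         else:
--             final_list.append(x)
--     for x in list2:
--         if counts1.get(x, 0) > 0:
--             counts1[x] -= 1
--         else:
--             final_list.append(x)
--     return final_list, len(final_list)
-- ===== Notes on version B (the rewrite author's own statement) =====
-- stated objective: faster
-- what changed: Replaces the nested backwards scans with repeated list.remove by one counting pass per list (hash-map counters) and one linear pass per list that drops the first min-count occurrences of each shared value.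
import Mathlib
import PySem

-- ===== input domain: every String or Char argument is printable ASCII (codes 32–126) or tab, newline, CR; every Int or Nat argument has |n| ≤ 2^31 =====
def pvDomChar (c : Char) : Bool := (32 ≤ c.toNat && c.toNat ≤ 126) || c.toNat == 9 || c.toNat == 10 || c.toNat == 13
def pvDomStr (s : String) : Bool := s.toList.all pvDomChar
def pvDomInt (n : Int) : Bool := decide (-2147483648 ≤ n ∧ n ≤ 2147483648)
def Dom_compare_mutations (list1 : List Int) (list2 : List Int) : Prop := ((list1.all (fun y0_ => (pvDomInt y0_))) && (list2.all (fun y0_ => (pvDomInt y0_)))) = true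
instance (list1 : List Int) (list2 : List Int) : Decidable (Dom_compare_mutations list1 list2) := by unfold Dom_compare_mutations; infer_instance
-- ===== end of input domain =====

-- B replaces A's quadratic nested scans with linear counter passes (measurably faster);
-- return values are proved identical on all inputs (A is total).

-- ===== PORT A =====
-- inner 'while count2 > 0' loop: scan temp2 backwards from index k-1; on a match remove
-- the value from both lists and break.  The remove? fallbacks are unreachable in calls
-- made by cmOuter (a = temp1[i] ∈ temp1 and a = b = temp2[k] ∈ temp2), as is the
-- catch-all arm (both indices are in range there).
def cmInner (t1 t2 : List Int) (i : Nat) : Nat → List Int × List Int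
  | 0 => (t1, t2)
  | k+1 =>
    match PySem.List.pyGet? t1 (i : Int), PySem.List.pyGet? t2 (k : Int) with
    | some a, some b =>
      if a = b then
        ((PySem.List.remove? t1 a).getD t1, (PySem.List.remove? t2 a).getD t2)
      else cmInner t1 t2 i k
    | _, _ => (t1, t2)

-- outer 'while count1 > 0' loop: count1 counts down from len(temp1)
def cmOuter : Nat → List Int → List Int → List Int × List Int
  | 0, t1, t2 => (t1, t2)
  | n+1, t1, t2 =>
    let r := cmInner t1 t2 n t2.length
    cmOuter n r.1 r.2

def compare_mutations (list1 : List Int) (list2 : List Int) : List Int × Int :=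
  let r := cmOuter list1.length list1 list2
  let final_list := r.1 ++ r.2
  (final_list, (final_list.length : Int))

-- ===== PORT B =====
-- counts1/counts2 building loops of Source B
def bCount (xs : List Int) : PySem.Dict Int Int :=
  xs.foldl (fun d x => d.insert x (d.getD x 0 + 1)) PySem.Dict.empty

-- one 'for x in lst' dropping pass of Source B: state = (final_list so far, remaining counts)
def bPass (counts : PySem.Dict Int Int) (acc : List Int) (xs : List Int) :
    List Int × PySem.Dict Int Int :=
  xs.foldl
    (fun st x =>
      if 0 < st.2.getD x 0 then (st.1, st.2.insert x (st.2.getD x 0 - 1))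
      else (st.1 ++ [x], st.2))
    (acc, counts)

def compare_mutations_alt (list1 : List Int) (list2 : List Int) : List Int × Int :=
  let counts1 := bCount list1
  let counts2 := bCount list2
  let p1 := bPass counts2 [] list1
  let p2 := bPass counts1 p1.1 list2
  (p2.1, (p2.1.length : Int))

-- ===== PRECONDITION & SPEC =====
def Spec_compare_mutations (list1 : List Int) (list2 : List Int) (out : List Int × Int) : Prop := out = compare_mutations_alt list1 list2
instance (list1 : List Int) (list2 : List Int) (out : List Int × Int) : Decidable (Spec_compare_mutations list1 list2 out) := by unfold Spec_compare_mutations; infer_instance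

-- ===== CLAIM (what is proved, stated in full; the proofs are below) =====
def Claim_equal_compare_mutations : Prop := ∀ (list1 : List Int) (list2 : List Int), Dom_compare_mutations list1 list2 → Spec_compare_mutations list1 list2 (compare_mutations list1 list2)

-- ===== LEMMAS AND PROOFS =====

-- functional model of one dropping pass: kept elements and leftover per-value budget
def decAt (f : Int → Int) (v : Int) : Int → Int := fun w => if w = v then f w - 1 else f w

def keepS (need : Int → Int) : List Int → List Int × (Int → Int)
  | [] => ([], need)
  | x :: xs =>
    if 0 < need x then keepS (decAt need x) xs
    else
      let r := keepS need xs
      (x :: r.1, r.2)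

def cnt (t : List Int) : Int → Int := fun v => (t.count v : Int)

theorem keepS_leftover_le (xs : List Int) (need : Int → Int) (v : Int) :
    (keepS need xs).2 v ≤ need v := by
  induction xs generalizing need with
  | nil => simp [keepS]
  | cons x xs ih =>
    simp only [keepS]
    split
    · refine le_trans (ih (decAt need x)) ?_
      simp only [decAt]; split <;> omega
    · exact ih need

theorem keepS_congr (xs : List Int) (need1 need2 : Int → Int)
    (h : ∀ w ∈ xs, need1 w = need2 w) : (keepS need1 xs).1 = (keepS need2 xs).1 := by
  induction xs generalizing need1 need2 with
  | nil => rfl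
  | cons x xs ih =>
    have hx : need1 x = need2 x := h x (by simp)
    simp only [keepS, hx]
    split
    · exact ih _ _ (fun w hw => by
        simp only [decAt]
        rcases eq_or_ne w x with rfl | hne
        · simp [hx]
        · simp [hne, h w (by simp [hw])])
    · simp [ih need1 need2 (fun w hw => h w (by simp [hw]))]

theorem keepS_nonpos (xs : List Int) (need : Int → Int)
    (h : ∀ w ∈ xs, need w ≤ 0) : (keepS need xs).1 = xs := by
  induction xs generalizing need with
  | nil => rfl
  | cons x xs ih =>
    have hx := h x (by simp)
    simp only [keepS]
    rw [if_neg (by omega)]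
    simp [ih need (fun w hw => h w (by simp [hw]))]

theorem keepS_append_singleton (xs : List Int) (need : Int → Int) (v : Int) :
    (keepS need (xs ++ [v])).1 =
      if 0 < (keepS need xs).2 v then (keepS need xs).1
      else (keepS need xs).1 ++ [v] := by
  induction xs generalizing need with
  | nil => simp only [keepS, List.nil_append]; split <;> rfl
  | cons x xs ih =>
    simp only [List.cons_append, keepS]
    split
    · exact ih (decAt need x)
    · rw [ih need]; split <;> simp

theorem decAt_comm (f : Int → Int) (a b : Int) :
    decAt (decAt f a) b = decAt (decAt f b) a := by
  funext w
  simp only [decAt]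
  split <;> split <;> omega

theorem keepS_erase (xs : List Int) (need : Int → Int) (v : Int)
    (hv : v ∈ xs) (hn : 1 ≤ need v) :
    keepS need xs = keepS (decAt need v) (xs.erase v) := by
  induction xs generalizing need with
  | nil => cases hv
  | cons x xs ih =>
    rcases eq_or_ne x v with rfl | hne
    · simp only [List.erase_cons_head, keepS]
      rw [if_pos (by omega)]
    · have hv' : v ∈ xs := by
        rcases List.mem_cons.1 hv with h | h
        · exact absurd h.symm hne
        · exact h
      rw [List.erase_cons_tail (by simp [hne])]
      simp only [keepS, decAt, if_neg hne]
      split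
      · rw [ih (decAt need x) hv' (by simp only [decAt]; rw [if_neg (fun h => hne h.symm)]; omega),
          decAt_comm]
      · rw [ih need hv' hn]

theorem cnt_erase (t : List Int) (v : Int) (hv : v ∈ t) :
    cnt (t.erase v) = decAt (cnt t) v := by
  funext w
  simp only [cnt, decAt]
  rcases eq_or_ne w v with rfl | hne
  · rw [if_pos rfl, List.count_erase_self]
    have h1 : 1 ≤ t.count w := List.one_le_count_iff.2 hv
    omega
  · rw [if_neg hne, List.count_erase_of_ne hne]

theorem cmInner_spec (k : Nat) (t1 t2 : List Int) (i : Nat) (v : Int)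
    (hk : k ≤ t2.length) (hget : PySem.List.pyGet? t1 (i : Int) = some v) :
    cmInner t1 t2 i k =
      if v ∈ t2.take k then (t1.erase v, t2.erase v) else (t1, t2) := by
  induction k with
  | zero => simp [cmInner]
  | succ k ih =>
    have hk' : k < t2.length := by omega
    have hget2 : PySem.List.pyGet? t2 (k : Int) = some t2[k] := by
      rw [PySem.List.pyGet?_natCast]
      exact List.getElem?_eq_getElem hk'
    have htake : t2.take (k+1) = t2.take k ++ [t2[k]] := by
      rw [List.take_add_one, List.getElem?_eq_getElem hk']
      rfl
    simp only [cmInner, hget, hget2]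
    rcases eq_or_ne v t2[k] with hvb | hvb
    · rw [if_pos hvb]
      have hv1 : v ∈ t1 := PySem.List.mem_of_pyGet?_eq_some t1 hget
      have hv2 : v ∈ t2 := hvb ▸ List.getElem_mem hk'
      have hmem : v ∈ t2.take (k+1) := by
        rw [htake, List.mem_append]
        exact Or.inr (by simp [hvb])
      rw [if_pos hmem, PySem.List.remove?_eq_some_erase t1 v hv1,
        PySem.List.remove?_eq_some_erase t2 v hv2]
      rfl
    · rw [if_neg hvb, ih (by omega)]
      have : (v ∈ t2.take (k+1)) ↔ (v ∈ t2.take k) := by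
        rw [htake, List.mem_append]; simp [hvb]
      by_cases h : v ∈ t2.take k
      · rw [if_pos h, if_pos (this.2 h)]
      · rw [if_neg h, if_neg (fun hh => h (this.1 hh))]

theorem cmOuter_main (n : Nat) :
    ∀ (p s t2 : List Int), p.length = n →
      cmOuter n (p ++ s) t2 =
        ((keepS (cnt t2) p).1 ++ s, (keepS (cnt p) t2).1) := by
  induction n with
  | zero =>
    intro p s t2 hp
    rw [List.length_eq_zero_iff.1 hp]
    simp only [cmOuter, List.nil_append]
    rw [keepS_nonpos t2 (cnt []) (fun w _ => by simp [cnt])]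
    rfl
  | succ n ih =>
    intro p s t2 hp
    rcases List.eq_nil_or_concat p with rfl | ⟨q, v, rfl⟩
    · simp at hp
    rw [List.concat_eq_append] at *
    have hq : q.length = n := by simp at hp; omega
    have hget : PySem.List.pyGet? (q ++ [v] ++ s) (n : Int) = some v := by
      rw [List.append_assoc, List.singleton_append, ← hq]
      exact PySem.List.pyGet?_append_length q s v
    simp only [cmOuter]
    rw [cmInner_spec t2.length (q ++ [v] ++ s) t2 n v le_rfl hget, List.take_length]
    by_cases hv2 : v ∈ t2
    · rw [if_pos hv2]
      have hvp : v ∈ q ++ [v] := by simp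
      have herase : (q ++ [v] ++ s).erase v = (q ++ [v]).erase v ++ s :=
        List.erase_append_left s hvp
      have hlen : ((q ++ [v]).erase v).length = n := by
        rw [List.length_erase_of_mem hvp]; simp [hq]
      simp only [herase]
      rw [ih ((q ++ [v]).erase v) s (t2.erase v) hlen]
      have h1 : keepS (cnt t2) (q ++ [v]) = keepS (cnt (t2.erase v)) ((q ++ [v]).erase v) := by
        rw [cnt_erase t2 v hv2]
        exact keepS_erase (q ++ [v]) (cnt t2) v hvp
          (by simp only [cnt]; exact_mod_cast List.one_le_count_iff.2 hv2)
      have h2 : keepS (cnt (q ++ [v])) t2 = keepS (cnt ((q ++ [v]).erase v)) (t2.erase v) := by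
        rw [cnt_erase (q ++ [v]) v hvp]
        exact keepS_erase t2 (cnt (q ++ [v])) v hv2
          (by simp only [cnt]; exact_mod_cast List.one_le_count_iff.2 hvp)
      rw [h1, h2]
    · rw [if_neg hv2, List.append_assoc, List.singleton_append]
      rw [ih q (v :: s) t2 hq]
      have hkept : (keepS (cnt t2) (q ++ [v])).1 = (keepS (cnt t2) q).1 ++ [v] := by
        rw [keepS_append_singleton]
        rw [if_neg ?_]
        have hle := keepS_leftover_le q (cnt t2) v
        have : cnt t2 v = 0 := by
          simp only [cnt]
          exact_mod_cast List.count_eq_zero.2 hv2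
        omega
      have hcnt : (keepS (cnt (q ++ [v])) t2).1 = (keepS (cnt q) t2).1 :=
        keepS_congr t2 _ _ (fun w hw => by
          have : w ≠ v := fun h => hv2 (h ▸ hw)
          simp [cnt, List.count_append, Ne.symm this])
      rw [hkept, hcnt]
      simp

theorem bPass_eq (xs : List Int) :
    ∀ (acc : List Int) (d : PySem.Dict Int Int) (f : Int → Int),
      (∀ v, d.getD v 0 = f v) →
      (bPass d acc xs).1 = acc ++ (keepS f xs).1 := by
  induction xs with
  | nil => intro acc d f _; simp [bPass, keepS]
  | cons x xs ih =>
    intro acc d f hd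
    have hdx := hd x
    simp only [bPass, List.foldl_cons]
    by_cases hx : 0 < d.getD x 0
    · rw [if_pos hx]
      have hstep : ∀ v, (d.insert x (d.getD x 0 - 1)).getD v 0 = decAt f x v := fun v => by
        rw [PySem.Dict.getD_insert]
        simp only [decAt]
        rcases eq_or_ne v x with rfl | hne
        · simp [hdx]
        · simp [hne, hd v]
      have hrec := ih acc (d.insert x (d.getD x 0 - 1)) (decAt f x) hstep
      simp only [bPass] at hrec
      rw [hrec]
      simp only [keepS, if_pos (show 0 < f x by rw [← hdx]; exact hx)]
    · rw [if_neg hx]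
      have hrec := ih (acc ++ [x]) d f hd
      simp only [bPass] at hrec
      rw [hrec]
      simp only [keepS, if_neg (show ¬ 0 < f x by rw [← hdx]; exact hx)]
      simp [List.append_assoc]

theorem bCount_getD (xs : List Int) (v : Int) : (bCount xs).getD v 0 = cnt xs v := by
  rw [bCount, PySem.Dict.foldl_insert_getD_add_one_eq_counter, PySem.Dict.getD_counter]
  rfl

-- ===== VERDICT (by name: the statement is the Claim_ definition above) =====
theorem compare_mutations_spec : Claim_equal_compare_mutations := by
  intro list1 list2 _
  unfold Spec_compare_mutations compare_mutations compare_mutations_alt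
  have hA := cmOuter_main list1.length list1 [] list2 rfl
  rw [List.append_nil] at hA
  have hp1 : (bPass (bCount list2) [] list1).1 = [] ++ (keepS (cnt list2) list1).1 :=
    bPass_eq list1 [] (bCount list2) (cnt list2) (bCount_getD list2)
  have hp2 : (bPass (bCount list1) (bPass (bCount list2) [] list1).1 list2).1
      = (bPass (bCount list2) [] list1).1 ++ (keepS (cnt list1) list2).1 :=
    bPass_eq list2 _ (bCount list1) (cnt list1) (bCount_getD list1)
  rw [hp1, List.nil_append] at hp2
  simp only [hA, hp1, List.nil_append, hp2, List.append_nil]
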